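-- pv_equiv track=rewrite | github.com/el-hadji-mamadou-sarr/lazywintab | main.py | group_windows
-- ===== SOURCE A (Python) =====
-- def group_windows(windows: list[tuple[int, str, str]]) -> list[tuple[int, str, str]]:
--     """Group windows by process name, preserving MRU order of the first window per group."""
--     # EnumWindows returns Z-order (MRU first)
--     seen: dict[str, list] = {}
--     for entry in windows:
--         key = entry[2].lower()  # process name
--         seen.setdefault(key, []).append(entry)
--
--     # Rebuild: for each group in order of first appearance, emit all its windows
--     ordered: list[tuple[int, str, str]] = []
--     emitted: set[str] = set()
--     for entry in windows:
--         key = entry[2].lower()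
--         if key not in emitted:
--             emitted.add(key)
--             ordered.extend(seen[key])
--     return ordered
-- ===== SOURCE B (Python) =====
-- def group_windows(windows: list[tuple[int, str, str]]) -> list[tuple[int, str, str]]:
--     """Group windows by process name, preserving MRU order of the first window per group."""
--     # Recursive partition: the first window's group comes first, then group the rest.
--     if not windows:
--         return []
--     key = windows[0][2].lower()
--     same = [e for e in windows if e[2].lower() == key]
--     rest = [e for e in windows if e[2].lower() != key]
--     return same + group_windows(rest)
-- ===== Notes on version B (the rewrite author's own statement) =====
-- stated objective: alternative
-- what changed: B uses no dict and no seen-set at all: it recursively partitions the list around the first entry's lowercased process name, emitting that whole group and recursing on the remaining entries (O(g*n) partition recursion vs A's two dict/set passes).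
import Mathlib
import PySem

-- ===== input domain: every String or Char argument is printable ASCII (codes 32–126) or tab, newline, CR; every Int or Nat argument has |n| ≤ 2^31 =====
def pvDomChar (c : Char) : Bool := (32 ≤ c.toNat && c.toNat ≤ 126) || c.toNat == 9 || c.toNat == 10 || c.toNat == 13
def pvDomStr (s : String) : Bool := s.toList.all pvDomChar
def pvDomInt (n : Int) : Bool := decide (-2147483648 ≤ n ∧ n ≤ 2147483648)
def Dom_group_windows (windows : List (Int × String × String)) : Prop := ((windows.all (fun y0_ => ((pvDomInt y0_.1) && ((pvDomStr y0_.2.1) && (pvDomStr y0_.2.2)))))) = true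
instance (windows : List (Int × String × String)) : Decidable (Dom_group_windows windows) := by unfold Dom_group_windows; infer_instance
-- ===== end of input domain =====

-- B replaces A's dict-of-buckets + seen-set two-pass scheme by a recursive partition
-- around the first entry's lowercased key (no dict, no set); objective: alternative.

-- ===== PORT A =====
def group_windows (windows : List (Int × String × String)) : List (Int × String × String) :=
  -- first loop: seen.setdefault(key, []).append(entry)  ==  d[k] = d.get(k, []) + [entry]
  let seen : PySem.Dict String (List (Int × String × String)) :=
    windows.foldl
      (fun d entry => d.modify (PySem.Str.lower entry.2.2) [] (fun g => g ++ [entry]))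
      PySem.Dict.empty
  -- second loop: rebuild in order of first appearance, with an 'emitted' set
  let res :=
    windows.foldl
      (fun (p : List (Int × String × String) × PySem.Set String) entry =>
        let key := PySem.Str.lower entry.2.2
        if PySem.Set.contains p.2 key then p
        else (p.1 ++ seen.getD key [], PySem.Set.add p.2 key))  -- seen[key] always present here
      ([], PySem.Set.empty)
  res.1

-- ===== PORT B =====
def group_windows_alt (windows : List (Int × String × String)) : List (Int × String × String) :=
  match windows with
  | [] => []
  | e :: t =>
    let key := PySem.Str.lower e.2.2
    ((e :: t).filter (fun x => PySem.Str.lower x.2.2 == key)) ++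
      group_windows_alt ((e :: t).filter (fun x => !(PySem.Str.lower x.2.2 == key)))
termination_by windows.length
decreasing_by
  simp only [List.filter_cons, beq_self_eq_true, Bool.not_true, if_neg, Bool.false_eq_true,
    not_false_eq_true, List.length_cons]
  exact Nat.lt_succ_of_le (List.length_filter_le _ _)

-- ===== PRECONDITION & SPEC =====
def Spec_group_windows (windows : List (Int × String × String)) (out : List (Int × String × String)) : Prop := out = group_windows_alt windows
instance (windows : List (Int × String × String)) (out : List (Int × String × String)) : Decidable (Spec_group_windows windows out) := by unfold Spec_group_windows; infer_instance

-- ===== CLAIM (what is proved, stated in full; the proofs are below) =====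
def Claim_equal_group_windows : Prop := ∀ (windows : List (Int × String × String)), Dom_group_windows windows → Spec_group_windows windows (group_windows windows)

-- ===== LEMMAS AND PROOFS =====

-- the lowercased process name used as the grouping key
def pvKey (e : Int × String × String) : String := PySem.Str.lower e.2.2

-- A's first loop
def pvBucket (windows : List (Int × String × String)) : PySem.Dict String (List (Int × String × String)) :=
  windows.foldl
    (fun d entry => d.modify (PySem.Str.lower entry.2.2) [] (fun g => g ++ [entry]))
    PySem.Dict.empty

-- the common normal form: groups in first-appearance key order, each group a filter
def pvGroups (windows : List (Int × String × String)) : List (Int × String × String) :=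
  ((PySem.Set.ofList (windows.map pvKey)).map
    (fun k => windows.filter (fun e => pvKey e == k))).flatten

theorem pvBucket_getD (ws : List (Int × String × String))
    (d : PySem.Dict String (List (Int × String × String))) (k : String) :
    (ws.foldl (fun d entry => d.modify (PySem.Str.lower entry.2.2) [] (fun g => g ++ [entry])) d).getD k []
      = d.getD k [] ++ ws.filter (fun e => pvKey e == k) := by
  induction ws generalizing d with
  | nil => simp
  | cons e rest ih =>
    simp only [List.foldl_cons, List.filter_cons]
    rw [ih]
    rw [PySem.Dict.getD_modify]
    by_cases h : k = PySem.Str.lower e.2.2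
    · simp [pvKey, h]
    · rw [if_neg h]
      have : (pvKey e == k) = false := by
        simp [pvKey]; exact fun hh => h hh.symm
      simp [this]

-- A's second loop, generalized over the accumulator and the emitted set
theorem pvLoopA (d : PySem.Dict String (List (Int × String × String)))
    (ws : List (Int × String × String)) (acc : List (Int × String × String))
    (s : PySem.Set String) :
    (ws.foldl
      (fun (p : List (Int × String × String) × PySem.Set String) entry =>
        let key := PySem.Str.lower entry.2.2
        if PySem.Set.contains p.2 key then p
        else (p.1 ++ d.getD key [], PySem.Set.add p.2 key))
      (acc, s)).1
    = acc ++ (((PySem.Set.ofList (ws.map pvKey)).filter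
        (fun k => !(PySem.Set.contains s k))).map (fun k => d.getD k [])).flatten := by
  induction ws generalizing acc s with
  | nil => simp
  | cons e rest ih =>
    simp only [List.foldl_cons, List.map_cons, PySem.Set.ofList_cons]
    by_cases h : PySem.Set.contains s (pvKey e) = true
    · rw [if_pos (by simpa [pvKey] using h)]
      rw [ih acc s]
      simp only [PySem.Set.discard, List.filter_filter, List.filter_cons, h, Bool.not_true,
        Bool.false_eq_true, if_false]
      congr 3
      apply List.filter_congr
      intro x hx
      have hmem : pvKey e ∈ s := (PySem.Set.contains_iff s (pvKey e)).mp h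
      by_cases hxk : x = pvKey e
      · subst hxk; simp [hmem]
      · simp [hxk]
    · rw [if_neg (by simpa [pvKey] using h)]
      rw [ih]
      have hnm : pvKey e ∉ s := by
        intro hmem
        exact h (by simpa [PySem.Set.contains_eq_listContains] using hmem)
      have h' : s.contains (PySem.Str.lower e.2.2) = false := by
        simpa [pvKey] using h
      simp only [List.filter_cons, pvKey, h', Bool.not_false, if_true, List.map_cons,
        List.flatten_cons, List.append_assoc, PySem.Set.discard, List.filter_filter]
      congr 4
      apply List.filter_congr
      intro x hx
      rw [PySem.Set.add_eq_ite, if_neg (by simpa [pvKey] using hnm)]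
      by_cases hxk : x = pvKey e
      · subst hxk
        simp [PySem.Set.contains_eq_listContains, pvKey]
      · simp [PySem.Set.contains_eq_listContains,
          show x ≠ PySem.Str.lower e.2.2 from by simpa [pvKey] using hxk]

-- A computes pvGroups
theorem pvA_eq_groups (ws : List (Int × String × String)) :
    group_windows ws = pvGroups ws := by
  show (ws.foldl
      (fun (p : List (Int × String × String) × PySem.Set String) entry =>
        let key := PySem.Str.lower entry.2.2
        if PySem.Set.contains p.2 key then p
        else (p.1 ++ (pvBucket ws).getD key [], PySem.Set.add p.2 key))
      ([], PySem.Set.empty)).1 = pvGroups ws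
  rw [pvLoopA (pvBucket ws) ws [] PySem.Set.empty]
  unfold pvGroups
  simp only [List.nil_append]
  have hfil : ((PySem.Set.ofList (ws.map pvKey)).filter
      (fun k => !(PySem.Set.contains PySem.Set.empty k))) = PySem.Set.ofList (ws.map pvKey) := by
    simp [PySem.Set.contains_eq_listContains, PySem.Set.empty]
  rw [hfil]
  congr 1
  apply List.map_congr_left
  intro k hk
  show (pvBucket ws).getD k [] = ws.filter (fun e => pvKey e == k)
  unfold pvBucket
  rw [pvBucket_getD]
  simp

-- dedup commutes with filter
theorem pvOfList_filter {α : Type} [BEq α] [LawfulBEq α] (p : α → Bool) (l : List α) :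
    (PySem.Set.ofList l).filter p = PySem.Set.ofList (l.filter p) := by
  induction l with
  | nil => rfl
  | cons x l ih =>
    by_cases hp : p x = true
    · simp only [PySem.Set.ofList_cons, List.filter_cons, hp, if_true]
      congr 1
      rw [← ih]
      simp only [PySem.Set.discard, List.filter_filter]
      apply List.filter_congr
      intro y _
      rw [Bool.and_comm]
    · have hpf : p x = false := by simpa using hp
      simp only [PySem.Set.ofList_cons, List.filter_cons, hpf, Bool.false_eq_true, if_false]
      rw [← ih]
      simp only [PySem.Set.discard, List.filter_filter]
      apply List.filter_congr
      intro y _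
      by_cases hyx : y = x
      · subst hyx; simp [hpf]
      · simp [hyx]

-- B computes pvGroups
set_option maxHeartbeats 1000000 in
theorem pvB_eq_groups (ws : List (Int × String × String)) :
    group_windows_alt ws = pvGroups ws := by
  induction hn : ws.length using Nat.strong_induction_on generalizing ws with
  | _ n ih =>
  match ws with
  | [] => rw [group_windows_alt]; rfl
  | e :: t =>
    rw [group_windows_alt]
    have hif : (!(PySem.Str.lower e.2.2 == PySem.Str.lower e.2.2)) = false := by simp
    have hrlen : ((e :: t).filter
        (fun x => !(PySem.Str.lower x.2.2 == PySem.Str.lower e.2.2))).length < n := by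
      subst hn
      rw [List.filter_cons, hif]
      simp only [Bool.false_eq_true, if_false, List.length_cons]
      exact Nat.lt_succ_of_le (List.length_filter_le _ _)
    rw [ih _ hrlen _ rfl]
    unfold pvGroups
    have hmapfil : ((e :: t).filter
          (fun x => !(PySem.Str.lower x.2.2 == PySem.Str.lower e.2.2))).map pvKey
        = ((e :: t).map pvKey).filter (fun s => !(s == PySem.Str.lower e.2.2)) := by
      rw [List.filter_map]
      congr 1
    have hkeys : PySem.Set.ofList ((e :: t).map pvKey)
        = pvKey e :: PySem.Set.ofList (((e :: t).filter
            (fun x => !(PySem.Str.lower x.2.2 == PySem.Str.lower e.2.2))).map pvKey) := by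
      rw [hmapfil, ← pvOfList_filter, List.map_cons, PySem.Set.ofList_cons]
      congr 1
      rw [List.filter_cons, show (!((pvKey e : String) == PySem.Str.lower e.2.2)) = false
        from by simp [pvKey]]
      simp only [Bool.false_eq_true, if_false, PySem.Set.discard, List.filter_filter]
      apply Eq.symm
      apply List.filter_congr
      intro y _
      simp [pvKey]
    rw [hkeys, List.map_cons, List.flatten_cons]
    congr 1
    congr 1
    apply List.map_congr_left
    intro k hk
    have hka : k ≠ PySem.Str.lower e.2.2 := by
      intro hkaeq
      rw [PySem.Set.mem_ofList, hmapfil, List.mem_filter, hkaeq] at hk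
      simp at hk
    rw [List.filter_filter]
    apply List.filter_congr
    intro x _
    by_cases hx : pvKey x = k
    · have h1 : (pvKey x == k) = true := by simpa using hx
      have h2 : (!(PySem.Str.lower x.2.2 == PySem.Str.lower e.2.2)) = true := by
        simp only [Bool.not_eq_true', beq_eq_false_iff_ne, ne_eq]
        intro hh
        exact hka (by rw [← hx, pvKey, hh])
      rw [h1, h2]
      rfl
    · have h1 : (pvKey x == k) = false := by simpa using hx
      rw [h1]
      simp

-- ===== VERDICT (by name: the statement is the Claim_ definition above) =====
theorem group_windows_spec : Claim_equal_group_windows := by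
  intro ws _
  unfold Spec_group_windows
  rw [pvA_eq_groups, pvB_eq_groups]
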